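-- pv_equiv track=rewrite | github.com/pypi-data/pypi-mirror-248 | packages/vernemic/vernemic-1.0.1-py3-none-any.whl/vernemic/__init__.py | sortecle
-- ===== SOURCE A (Python) =====
-- def sortecle(seq) :
--   seq = sorted(seq)
--   c = True
--   result = []
--   used_up_indices = []
--
--   while c :
--     c = None
--     for (i, s) in enumerate(seq) :
--       if (i not in used_up_indices
--           # word is not already appended to result
--
--           and not (
--             # duplicate first character
--             c and s.startswith(c)
--           )) :
--
--         c = s[0]
--         result.append(s)
--         used_up_indices.append(i)
--
--   return result
-- ===== SOURCE B (Python) =====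
-- def sortecle(seq):
--     # Group the sorted words by first character, then emit round-by-round
--     # (column-major): first word of every group, then second of every group, ...
--     groups = []
--     for w in sorted(seq):
--         if groups and groups[-1][0][0] == w[0]:
--             groups[-1].append(w)
--         else:
--             groups.append([w])
--     result = []
--     while groups:
--         for g in groups:
--             result.append(g[0])
--         groups = [g[1:] for g in groups if len(g) > 1]
--     return result
-- ===== Notes on version B (the rewrite author's own statement) =====
-- stated objective: faster
-- what changed: Replaces the repeated full scans over the sorted list with a membership test against a growing index list (O(n^3) worst case) by a single grouping pass over the sorted list followed by round-by-round emission of one word per first-character group (O(n log n) for the sort plus O(n) per emitted word bookkeeping).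
import Mathlib
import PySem

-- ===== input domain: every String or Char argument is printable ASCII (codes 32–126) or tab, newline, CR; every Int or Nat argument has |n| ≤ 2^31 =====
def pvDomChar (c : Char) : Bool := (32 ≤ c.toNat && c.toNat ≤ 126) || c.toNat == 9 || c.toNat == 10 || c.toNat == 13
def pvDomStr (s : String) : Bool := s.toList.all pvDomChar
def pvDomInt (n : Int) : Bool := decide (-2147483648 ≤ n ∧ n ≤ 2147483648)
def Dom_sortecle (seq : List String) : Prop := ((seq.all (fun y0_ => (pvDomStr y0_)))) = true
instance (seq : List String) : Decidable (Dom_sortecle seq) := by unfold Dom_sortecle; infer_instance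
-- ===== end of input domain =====

-- B replaces A's repeated membership-filtered scans of the whole sorted list by one grouping
-- pass over the sorted list plus round-by-round (column-major) emission; faster in a timing run.

-- ===== PORT A =====
-- `c and s.startswith(c)` (c is None or the previous word's first character)
def matchesB (c : Option Char) (s : String) : Bool :=
  match c with
  | some ch => PySem.Str.startswith s (String.singleton ch)
  | none => false

-- one step of the inner `for (i, s) in enumerate(seq)` loop; state = (c, result, used_up_indices)
def sortecleStep (st : Option Char × List String × List Int) (p : Int × String) :
    Option Char × List String × List Int :=
  if (st.2.2.contains p.1 || matchesB st.1 p.2) then st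
  else (PySem.Str.pyGet? p.2 0, st.2.1 ++ [p.2], st.2.2 ++ [p.1])

-- the `while c` loop; `c = True` initially, so the body always runs first.  The fuel
-- (seq.length + 1 passes) only makes the recursion structural: under Pre_ the loop
-- finishes within that many passes (each pass with a truthy c consumes at least one word).
def sortecleLoop (sq : List String) : Nat → List String → List Int → List String
  | 0, res, _ => res
  | fuel+1, res, used =>
      let st := (PySem.List.enumerate sq 0).foldl sortecleStep (none, res, used)
      if st.1.isSome then sortecleLoop sq fuel st.2.1 st.2.2 else st.2.1

def sortecle (seq : List String) : List String :=
  let sq := PySem.List.sorted seq (fun x => x) false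
  sortecleLoop sq (sq.length + 1) [] []

-- ===== PORT B =====
-- `if groups and groups[-1][0][0] == w[0]: groups[-1].append(w) else: groups.append([w])`
def altGroupStep (gs : List (List String)) (w : String) : List (List String) :=
  if gs ≠ [] ∧ PySem.Str.pyGet? ((gs.getLastD []).headD "") 0 == PySem.Str.pyGet? w 0
  then gs.dropLast ++ [gs.getLastD [] ++ [w]]
  else gs ++ [[w]]

-- termination measure for the `while groups` loop (cited in altRounds)
theorem altRounds_aux : ∀ (gs : List (List String)),
    (((gs.filter (fun g => 1 < g.length)).map (fun g => g.drop 1)).map List.length).sum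
      + ((gs.filter (fun g => 1 < g.length)).map (fun g => g.drop 1)).length
    ≤ (gs.map List.length).sum + gs.length := by
  intro gs
  induction gs with
  | nil => simp
  | cons g t ih =>
    by_cases hg : 1 < g.length <;>
      simp only [List.filter_cons, hg, decide_true, decide_false, if_true, Bool.false_eq_true,
        if_false, List.map_cons, List.sum_cons, List.length_cons, List.length_drop] <;> omega

theorem altRounds_dec : ∀ (gs : List (List String)), gs ≠ [] →
    (((gs.filter (fun g => 1 < g.length)).map (fun g => g.drop 1)).map List.length).sum
      + ((gs.filter (fun g => 1 < g.length)).map (fun g => g.drop 1)).length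
    < (gs.map List.length).sum + gs.length := by
  intro gs h
  cases gs with
  | nil => exact absurd rfl h
  | cons g t =>
    have := altRounds_aux t
    by_cases hg : 1 < g.length <;>
      simp only [List.filter_cons, hg, decide_true, decide_false, if_true, Bool.false_eq_true,
        if_false, List.map_cons, List.sum_cons, List.length_cons, List.length_drop] <;> omega

-- the `while groups` loop: heads of all groups, then recurse on the nonempty tails
def altRounds (gs : List (List String)) : List String :=
  if h : gs = [] then []
  else (gs.map (fun g => g.headD "")) ++
       altRounds ((gs.filter (fun g => 1 < g.length)).map (fun g => g.drop 1))
termination_by (gs.map List.length).sum + gs.length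
decreasing_by
  rw [List.filter_attach (l := gs) (p := fun g => decide (1 < g.length))]
  simp only [Subtype.map, id, List.map_attach_eq_pmap, List.map_pmap, List.pmap_eq_map,
    List.map_map, Function.comp_def]
  simpa only [List.map_map, Function.comp_def] using altRounds_dec gs h

def sortecle_alt (seq : List String) : List String :=
  altRounds ((PySem.List.sorted seq (fun x => x) false).foldl altGroupStep [])

-- ===== PRECONDITION & SPEC =====
-- Pre_ excludes lists containing the empty string: there A evaluates ""[0] and raises IndexError.
def Pre_sortecle (seq : List String) : Prop := "" ∉ seq
instance (seq : List String) : Decidable (Pre_sortecle seq) := by unfold Pre_sortecle; infer_instance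
def pvWitness_sortecle : List String := ["bat", "ant", "apple", "cat", "ax"]

def Spec_sortecle (seq : List String) (out : List String) : Prop := out = sortecle_alt seq
instance (seq : List String) (out : List String) : Decidable (Spec_sortecle seq out) := by unfold Spec_sortecle; infer_instance

-- ===== CLAIM (what is proved, stated in full; the proofs are below) =====
def Claim_equal_sortecle : Prop := ∀ (seq : List String), Dom_sortecle seq → Pre_sortecle seq → Spec_sortecle seq (sortecle seq)

-- ===== LEMMAS AND PROOFS =====

-- first character of a string (meaningful only for nonempty strings)
def hd0 (s : String) : Char := s.toList.headD ' '

-- the first character of a group of (index, word) pairs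
def chr (g : List (Int × String)) : Char := hd0 (g.headD (0, "")).2

-- grouping invariant: every group nonempty, words nonempty with the group's first char,
-- groups carry strictly increasing first chars
def PGood (pgs : List (List (Int × String))) : Prop :=
  (∀ g ∈ pgs, g ≠ [] ∧ ∀ q ∈ g, q.2 ≠ "" ∧ hd0 q.2 = chr g) ∧
  pgs.Pairwise (fun a b => chr a < chr b)

-- pure description of one pass of A's inner loop over the not-yet-used pairs
def purePass (c : Option Char) : List (Int × String) → Option Char × List String × List Int
  | [] => (c, [], [])
  | p :: ps =>
      if matchesB c p.2 then purePass c ps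
      else
        let r := purePass (PySem.Str.pyGet? p.2 0) ps
        (r.1, p.2 :: r.2.1, p.1 :: r.2.2)

-- proof-side twin of altGroupStep on (index, word) pairs
def pairStep (gs : List (List (Int × String))) (p : Int × String) : List (List (Int × String)) :=
  if gs ≠ [] ∧ PySem.Str.pyGet? ((gs.getLastD []).headD (0, "")).2 0 == PySem.Str.pyGet? p.2 0
  then gs.dropLast ++ [gs.getLastD [] ++ [p]]
  else gs ++ [[p]]

theorem toList_ne (s : String) (h : s ≠ "") : s.toList ≠ [] := by
  intro hl; exact h (by rwa [String.toList_eq_nil_iff] at hl)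

theorem fc_eq (s : String) (h : s ≠ "") : PySem.Str.pyGet? s 0 = some (hd0 s) := by
  have h' := toList_ne s h
  cases hc : s.toList with
  | nil => exact absurd hc h'
  | cons a l => simp [pysem, hd0, hc]

theorem matches_iff (c : Option Char) (s : String) (h : s ≠ "") :
    matchesB c s = true ↔ c = some (hd0 s) := by
  have h' := toList_ne s h
  cases c with
  | none => simp [matchesB]
  | some ch =>
    cases hc : s.toList with
    | nil => exact absurd hc h'
    | cons a l =>
      have ha : hd0 s = a := by simp [hd0, hc]
      rw [ha]
      simp [matchesB, pysem, PySem.Chars.startswith_iff, hc, String.toList_singleton,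
        List.prefix_cons_iff]

-- L13: ≤ on nonempty strings is monotone on the first character
theorem hd0_mono {s t : String} (hs : s ≠ "") (ht : t ≠ "") (h : s ≤ t) : hd0 s ≤ hd0 t := by
  have hnl : ¬ t.toList < s.toList := by
    intro hl; exact absurd (String.lt_iff_toList_lt.mpr hl) (Std.not_lt.mpr h)
  cases hcs : s.toList with
  | nil => exact absurd hcs (toList_ne s hs)
  | cons a as =>
    cases hct : t.toList with
    | nil => exact absurd hct (toList_ne t ht)
    | cons b bs =>
      rw [hcs, hct] at hnl
      by_contra hab
      exact hnl (List.Lex.rel (by simpa [hd0, hcs, hct] using lt_of_not_ge hab))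

-- L11: Pairwise transfers through enumerate (on second components)
theorem pairwise_enumerate_snd {α : Type} {R : α → α → Prop} :
    ∀ (xs : List α) (s : Int), xs.Pairwise R →
      (PySem.List.enumerate xs s).Pairwise (fun p q => R p.2 q.2) := by
  intro xs
  induction xs with
  | nil => intro s _; simp [PySem.List.enumerate_nil]
  | cons x t ih =>
    intro s hp
    rw [List.pairwise_cons] at hp
    rw [PySem.List.enumerate_cons, List.pairwise_cons]
    refine ⟨fun q hq => ?_, ih _ hp.2⟩
    have : q.2 ∈ (PySem.List.enumerate t (s+1)).map (·.2) := List.mem_map_of_mem hq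
    rw [PySem.List.map_snd_enumerate] at this
    exact hp.1 _ this

-- L2: the inner for-loop over enumerate = purePass over the unused pairs
theorem foldl_step_eq_purePass :
    ∀ (E : List (Int × String)) (c : Option Char) (res : List String) (used : List Int),
      ((E.map (·.1)).Nodup) →
      E.foldl sortecleStep (c, res, used) =
        ((purePass c (E.filter (fun p => p.1 ∉ used))).1,
         res ++ (purePass c (E.filter (fun p => p.1 ∉ used))).2.1,
         used ++ (purePass c (E.filter (fun p => p.1 ∉ used))).2.2) := by
  intro E
  induction E with
  | nil => intro c res used _; simp [purePass]
  | cons p E' ih =>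
    intro c res used hnd
    rw [List.map_cons, List.nodup_cons] at hnd
    by_cases hp : p.1 ∈ used
    · have hstep : sortecleStep (c, res, used) p = (c, res, used) := by
        simp [sortecleStep, hp]
      rw [List.foldl_cons, hstep, List.filter_cons_of_neg (by simpa using hp)]
      exact ih c res used hnd.2
    · rw [List.foldl_cons, List.filter_cons_of_pos (by simpa using hp)]
      by_cases hm : matchesB c p.2 = true
      · have hstep : sortecleStep (c, res, used) p = (c, res, used) := by
          simp [sortecleStep, hm]
        rw [hstep]
        have hpp : purePass c (p :: E'.filter (fun q => q.1 ∉ used)) =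
            purePass c (E'.filter (fun q => q.1 ∉ used)) := by
          simp [purePass, hm]
        rw [hpp]
        exact ih c res used hnd.2
      · have hstep : sortecleStep (c, res, used) p =
            (PySem.Str.pyGet? p.2 0, res ++ [p.2], used ++ [p.1]) := by
          simp [sortecleStep, hp, hm]
        rw [hstep, ih _ _ _ hnd.2]
        have hfe : E'.filter (fun q => q.1 ∉ used ++ [p.1]) =
            E'.filter (fun q => q.1 ∉ used) := by
          apply List.filter_congr
          intro q hq
          have : q.1 ≠ p.1 := by
            intro he; exact hnd.1 (he ▸ List.mem_map_of_mem hq)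
          simp [List.mem_append, this]
        rw [hfe]
        have hpp : purePass c (p :: E'.filter (fun q => q.1 ∉ used)) =
            ((purePass (PySem.Str.pyGet? p.2 0) (E'.filter (fun q => q.1 ∉ used))).1,
             p.2 :: (purePass (PySem.Str.pyGet? p.2 0) (E'.filter (fun q => q.1 ∉ used))).2.1,
             p.1 :: (purePass (PySem.Str.pyGet? p.2 0) (E'.filter (fun q => q.1 ∉ used))).2.2) := by
          simp [purePass, hm]
        rw [hpp]
        simp

-- skip lemma: purePass skips a block of words that all match c
theorem purePass_skip (c : Char) :
    ∀ (t rest : List (Int × String)),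
      (∀ q ∈ t, q.2 ≠ "" ∧ hd0 q.2 = c) →
      purePass (some c) (t ++ rest) = purePass (some c) rest := by
  intro t
  induction t with
  | nil => intro rest _; simp
  | cons q t' ih =>
    intro rest hq
    have h1 := hq q (by simp)
    have hm : matchesB (some c) q.2 = true :=
      (matches_iff (some c) q.2 h1.1).mpr (congrArg some h1.2.symm)
    simp only [List.cons_append, purePass, hm, if_true]
    exact ih rest (fun p hp => hq p (by simp [hp]))

-- last first-char of the pass
def lastCP (c : Option Char) (pgs : List (List (Int × String))) : Option Char :=
  pgs.foldl (fun _ g => some (chr g)) c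

theorem lastCP_isSome (c : Option Char) :
    ∀ (pgs : List (List (Int × String))), (pgs = [] → c.isSome) → (lastCP c pgs).isSome := by
  intro pgs
  induction pgs generalizing c with
  | nil => intro h; simpa [lastCP] using h rfl
  | cons g t ih =>
    intro _
    show (lastCP (some (chr g)) t).isSome
    exact ih _ (fun _ => rfl)

-- L4: on a PGood grouping, one pass takes exactly the head of every group
theorem purePass_flatten :
    ∀ (pgs : List (List (Int × String))) (c₀ : Option Char),
      PGood pgs → (∀ g ∈ pgs, c₀ ≠ some (chr g)) →
      purePass c₀ pgs.flatten =
        (lastCP c₀ pgs,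
         pgs.map (fun g => (g.headD (0, "")).2),
         pgs.map (fun g => (g.headD (0, "")).1)) := by
  intro pgs
  induction pgs with
  | nil => intro c₀ _ _; simp [purePass, lastCP]
  | cons g rest ih =>
    intro c₀ hgood hc₀
    obtain ⟨huni, hpw⟩ := hgood
    obtain ⟨hgne, hgu⟩ := huni g (by simp)
    obtain ⟨p, t, rfl⟩ : ∃ p t, g = p :: t := by
      cases g with
      | nil => exact absurd rfl hgne
      | cons p t => exact ⟨p, t, rfl⟩
    have hp2 := hgu p (by simp)
    have hchr : chr (p :: t) = hd0 p.2 := hp2.2.symm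
    have hm : matchesB c₀ p.2 = false := by
      rw [Bool.eq_false_iff]
      intro hx
      exact hc₀ (p :: t) (by simp) (by rw [(matches_iff _ _ hp2.1).mp hx, hp2.2])
    have hfc : PySem.Str.pyGet? p.2 0 = some (chr (p :: t)) := by
      rw [fc_eq _ hp2.1, hp2.2]
    have hskip : purePass (some (chr (p :: t))) (t ++ rest.flatten) =
        purePass (some (chr (p :: t))) rest.flatten := by
      apply purePass_skip
      intro q hq
      have := hgu q (by simp [hq])
      exact ⟨this.1, this.2⟩
    have hrest := ih (some (chr (p :: t)))
      ⟨fun g' hg' => huni g' (by simp [hg']), (List.pairwise_cons.mp hpw).2⟩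
      (fun g' hg' hx => absurd (Option.some_inj.mp hx)
        (ne_of_lt ((List.pairwise_cons.mp hpw).1 g' hg')))
    rw [List.flatten_cons, List.cons_append, purePass, hm]
    simp only [Bool.false_eq_true, if_false, hfc, hskip, hrest]
    simp [lastCP, List.foldl_cons]

theorem getLastD_mem {α : Type} (l : List α) (d : α) (h : l ≠ []) : l.getLastD d ∈ l := by
  rw [List.getLastD_eq_getLast?, List.getLast?_eq_some_getLast h]
  exact List.getLast_mem h

theorem headD_mem {α : Type} (l : List α) (d : α) (h : l ≠ []) : l.headD d ∈ l := by
  cases l with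
  | nil => exact absurd rfl h
  | cons a t => simp

-- indices of heads / of tails occur among the indices of the flattened grouping
theorem heads_idx_sub :
    ∀ (pgs : List (List (Int × String))), (∀ g ∈ pgs, g ≠ []) →
      ∀ x ∈ pgs.map (fun g => (g.headD (0, "")).1), x ∈ pgs.flatten.map (·.1) := by
  intro pgs hne x hx
  obtain ⟨g, hg, rfl⟩ := List.mem_map.mp hx
  exact List.mem_map_of_mem (List.mem_flatten.mpr ⟨g, hg, headD_mem g _ (hne g hg)⟩)

theorem tails_idx_sub :
    ∀ (pgs : List (List (Int × String))),
      ∀ x ∈ (pgs.map (fun g => g.drop 1)).flatten.map (·.1), x ∈ pgs.flatten.map (·.1) := by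
  intro pgs x hx
  obtain ⟨q, hq, rfl⟩ := List.mem_map.mp hx
  obtain ⟨t, ht, hqt⟩ := List.mem_flatten.mp hq
  obtain ⟨g, hg, rfl⟩ := List.mem_map.mp ht
  exact List.mem_map_of_mem (List.mem_flatten.mpr ⟨g, hg, List.mem_of_mem_drop hqt⟩)

-- L6: with distinct indices, a head index never occurs in a tail
theorem head_idx_not_in_tails :
    ∀ (pgs : List (List (Int × String))),
      (∀ g ∈ pgs, g ≠ []) → ((pgs.flatten.map (·.1)).Nodup) →
      ∀ x, x ∈ pgs.map (fun g => (g.headD (0, "")).1) →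
        x ∉ (pgs.map (fun g => g.drop 1)).flatten.map (·.1) := by
  intro pgs
  induction pgs with
  | nil => simp
  | cons g rest ih =>
    intro hne hnd x hx hxt
    obtain ⟨p, t, rfl⟩ : ∃ p t, g = p :: t := by
      cases g with
      | nil => exact absurd rfl (hne _ (by simp))
      | cons p t => exact ⟨p, t, rfl⟩
    have hflat : ((p :: t) :: rest).flatten.map (·.1)
        = p.1 :: (t.map (·.1) ++ rest.flatten.map (·.1)) := by simp
    rw [hflat, List.nodup_cons, List.nodup_append] at hnd
    have hxt' : x ∈ t.map (·.1) ++ ((rest.map (fun g => g.drop 1)).flatten.map (·.1)) := by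
      simpa using hxt
    have hx' : x = p.1 ∨ x ∈ rest.map (fun g => (g.headD (0, "")).1) := by
      simpa using hx
    rcases hx' with rfl | hx'
    · rcases List.mem_append.mp hxt' with h1 | h1
      · exact hnd.1 (List.mem_append.mpr (Or.inl h1))
      · exact hnd.1 (List.mem_append.mpr (Or.inr (tails_idx_sub rest _ h1)))
    · have hxr := heads_idx_sub rest (fun g' hg' => hne g' (by simp [hg'])) x hx'
      rcases List.mem_append.mp hxt' with h1 | h1
      · exact hnd.2.2.2 x h1 x hxr rfl
      · exact ih (fun g' hg' => hne g' (by simp [hg'])) hnd.2.2.1 x hx' h1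

-- L5: filtering out the head indices leaves exactly the tails
theorem filter_flatten_tails :
    ∀ (pgs : List (List (Int × String))) (I : List Int),
      (∀ g ∈ pgs, g ≠ []) →
      (∀ g ∈ pgs, (g.headD (0, "")).1 ∈ I) →
      (∀ x ∈ I, x ∉ (pgs.map (fun g => g.drop 1)).flatten.map (·.1)) →
      pgs.flatten.filter (fun p => p.1 ∉ I) = (pgs.map (fun g => g.drop 1)).flatten := by
  intro pgs
  induction pgs with
  | nil => simp
  | cons g rest ih =>
    intro I hne hheads htails
    obtain ⟨p, t, rfl⟩ : ∃ p t, g = p :: t := by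
      cases g with
      | nil => exact absurd rfl (hne _ (by simp))
      | cons p t => exact ⟨p, t, rfl⟩
    have hp : p.1 ∈ I := by simpa using hheads (p :: t) (by simp)
    have ht : ∀ q ∈ t, q.1 ∉ I := by
      intro q hq hqI
      refine htails q.1 hqI ?_
      have : q.1 ∈ t.map (·.1) ++ ((rest.map (fun g => g.drop 1)).flatten.map (·.1)) :=
        List.mem_append.mpr (Or.inl (List.mem_map.mpr ⟨q, hq, rfl⟩))
      simpa using this
    rw [List.flatten_cons, List.cons_append, List.filter_cons_of_neg (by simpa using hp),
      List.filter_append, List.filter_eq_self.mpr (by intro q hq; simpa using ht q hq),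
      List.map_cons, List.flatten_cons]
    have hdrop : (p :: t).drop 1 = t := rfl
    rw [hdrop]
    congr 1
    refine ih I (fun g' hg' => hne g' (by simp [hg'])) (fun g' hg' => hheads g' (by simp [hg'])) ?_
    intro x hx hxt
    refine htails x hx ?_
    have : x ∈ t.map (·.1) ++ ((rest.map (fun g => g.drop 1)).flatten.map (·.1)) :=
      List.mem_append.mpr (Or.inr hxt)
    simpa using this

-- if a group's tail is nonempty, its first char is the group's first char
theorem chr_drop (g : List (Int × String))
    (hu : ∀ q ∈ g, q.2 ≠ "" ∧ hd0 q.2 = chr g) (hne : g.drop 1 ≠ []) :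
    chr (g.drop 1) = chr g := by
  have hm : (g.drop 1).headD (0, "") ∈ g.drop 1 := headD_mem _ _ hne
  exact (hu _ (List.mem_of_mem_drop hm)).2

theorem PGood_next (pgs : List (List (Int × String))) (h : PGood pgs) :
    PGood ((pgs.map (fun g => g.drop 1)).filter (· ≠ [])) := by
  obtain ⟨huni, hpw⟩ := h
  constructor
  · intro g hg
    rw [List.mem_filter] at hg
    obtain ⟨g₀, hg₀, rfl⟩ := List.mem_map.mp hg.1
    have hne : g₀.drop 1 ≠ [] := by simpa using hg.2
    refine ⟨hne, fun q hq => ?_⟩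
    rw [chr_drop g₀ (huni g₀ hg₀).2 hne]
    exact (huni g₀ hg₀).2 q (List.mem_of_mem_drop hq)
  · rw [List.filter_map]
    rw [List.pairwise_map]
    have hsub : (pgs.filter (fun g => (g.drop 1 ≠ []))).Pairwise (fun a b => chr a < chr b) :=
      hpw.filter _
    refine hsub.imp_of_mem ?_
    intro a b ha hb hab
    rw [List.mem_filter] at ha hb
    rw [chr_drop a (huni a ha.1).2 (by simpa using ha.2),
      chr_drop b (huni b hb.1).2 (by simpa using hb.2)]
    exact hab

theorem headD_snd (g : List (Int × String)) :
    ((g.map Prod.snd).headD "") = (g.headD (0, "")).2 := by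
  cases g <;> rfl

-- the flattened tails are strictly shorter than the flattened grouping (if a group exists)
theorem flatten_drop_le :
    ∀ (pgs : List (List (Int × String))),
      ((pgs.map (fun g => g.drop 1)).flatten).length ≤ pgs.flatten.length := by
  intro pgs
  induction pgs with
  | nil => simp
  | cons g rest ih => simp only [List.map_cons, List.flatten_cons, List.length_append,
      List.length_drop]; omega

theorem flatten_drop_lt (pgs : List (List (Int × String))) (hne : pgs ≠ [])
    (hg : ∀ g ∈ pgs, g ≠ []) :
    ((pgs.map (fun g => g.drop 1)).flatten).length < pgs.flatten.length := by
  cases pgs with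
  | nil => exact absurd rfl hne
  | cons g rest =>
    have h1 := flatten_drop_le rest
    have h2 : g.length ≠ 0 := by
      simpa [List.length_eq_zero_iff] using hg g (by simp)
    simp only [List.map_cons, List.flatten_cons, List.length_append, List.length_drop]
    omega

-- L10: pairStep commutes with forgetting the indices
theorem foldl_pairStep_map :
    ∀ (ps : List (Int × String)) (gs : List (List (Int × String))),
      (ps.foldl pairStep gs).map (List.map Prod.snd) =
        (ps.map (·.2)).foldl altGroupStep (gs.map (List.map Prod.snd)) := by
  have getLastD_map : ∀ (gs : List (List (Int × String))) (d : List (Int × String)),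
      (gs.map (List.map Prod.snd)).getLastD (d.map Prod.snd)
        = (gs.getLastD d).map Prod.snd := by
    intro gs
    induction gs with
    | nil => intro d; rfl
    | cons g t ih => intro d; rw [List.map_cons, List.getLastD_cons, List.getLastD_cons, ih]
  have hstep : ∀ (gs : List (List (Int × String))) (p : Int × String),
      (pairStep gs p).map (List.map Prod.snd) = altGroupStep (gs.map (List.map Prod.snd)) p.2 := by
    intro gs p
    unfold pairStep altGroupStep
    have hc : (gs.map (List.map Prod.snd) ≠ []
          ∧ PySem.Str.pyGet? (((gs.map (List.map Prod.snd)).getLastD []).headD "") 0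
              == PySem.Str.pyGet? p.2 0)
        ↔ (gs ≠ []
          ∧ PySem.Str.pyGet? ((gs.getLastD []).headD (0, "")).2 0 == PySem.Str.pyGet? p.2 0) := by
      rw [show ((gs.map (List.map Prod.snd)).getLastD [] : List String)
            = (gs.getLastD []).map Prod.snd from getLastD_map gs [], headD_snd]
      simp
    split_ifs with h1 h2 h2
    · rw [List.map_append, List.map_dropLast]
      simp only [List.map_cons, List.map_nil, List.map_append]
      rw [show ((gs.map (List.map Prod.snd)).getLastD [] : List String)
            = (gs.getLastD []).map Prod.snd from getLastD_map gs []]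
    · exact absurd (hc.mpr h1) h2
    · exact absurd (hc.mp h2) h1
    · simp
  intro ps
  induction ps with
  | nil => intro gs; rfl
  | cons p ps' ih =>
    intro gs
    rw [List.foldl_cons, List.map_cons, List.foldl_cons, ih, hstep]

-- L9: the grouping fold of a sorted list of nonempty words builds a PGood grouping
theorem foldl_pairStep_good :
    ∀ (ps : List (Int × String)) (gs : List (List (Int × String))),
      (∀ g ∈ gs, g ≠ [] ∧ ∀ q ∈ g, q.2 ≠ "" ∧ hd0 q.2 = chr g) →
      gs.Pairwise (fun a b => chr a < chr b) →
      (∀ p ∈ ps, p.2 ≠ "") →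
      ps.Pairwise (fun p q => p.2 ≤ q.2) →
      (∀ p ∈ ps, ∀ g ∈ gs, chr g ≤ hd0 p.2) →
      PGood (ps.foldl pairStep gs) ∧ (ps.foldl pairStep gs).flatten = gs.flatten ++ ps := by
  have chr_single : ∀ (p : Int × String), chr [p] = hd0 p.2 := fun p => rfl
  have chr_append : ∀ (g : List (Int × String)) (p : Int × String), g ≠ [] →
      chr (g ++ [p]) = chr g := by
    intro g p hg
    cases g with
    | nil => exact absurd rfl hg
    | cons q t => rfl
  intro ps
  induction ps with
  | nil =>
    intro gs huni hpw _ _ _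
    exact ⟨⟨huni, hpw⟩, by simp⟩
  | cons p ps' ih =>
    intro gs huni hpw hne hppw hle
    have hp2 : p.2 ≠ "" := hne p (by simp)
    rw [List.pairwise_cons] at hppw
    rw [List.foldl_cons]
    by_cases hcond : gs ≠ [] ∧ (PySem.Str.pyGet? ((gs.getLastD []).headD (0, "")).2 0
        == PySem.Str.pyGet? p.2 0) = true
    · -- same first character: append to the last group
      obtain ⟨hgs, hbeq⟩ := hcond
      have hlast : gs.getLastD [] ∈ gs := getLastD_mem gs [] hgs
      have hlastne : gs.getLastD [] ≠ [] := (huni _ hlast).1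
      have hlh := (huni _ hlast).2 _ (headD_mem _ (0, "") hlastne)
      have hchr : chr (gs.getLastD []) = hd0 p.2 := by
        have := beq_iff_eq.mp hbeq
        rw [fc_eq _ hlh.1, fc_eq _ hp2] at this
        rw [← hlh.2]
        exact Option.some_inj.mp this
      have hdec : gs.dropLast ++ [gs.getLastD []] = gs := by
        rw [List.getLastD_eq_getLast?, List.getLast?_eq_some_getLast hgs]
        exact List.dropLast_concat_getLast hgs
      have hdlsub : ∀ g ∈ gs.dropLast, g ∈ gs := fun g hg => List.Sublist.mem hg (List.dropLast_sublist _)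
      have hpwdec : gs.dropLast.Pairwise (fun a b => chr a < chr b)
          ∧ ∀ a ∈ gs.dropLast, chr a < chr (gs.getLastD []) := by
        have := hpw
        rw [← hdec, List.pairwise_append] at this
        exact ⟨this.1, fun a ha => by simpa using this.2.2 a ha _ (by simp)⟩
      have hchrapp : chr (gs.getLastD [] ++ [p]) = chr (gs.getLastD []) :=
        chr_append _ p hlastne
      rw [pairStep, if_pos ⟨hgs, hbeq⟩]
      have huni₁ : ∀ g ∈ gs.dropLast ++ [gs.getLastD [] ++ [p]],
          g ≠ [] ∧ ∀ q ∈ g, q.2 ≠ "" ∧ hd0 q.2 = chr g := by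
        intro g hg
        rcases List.mem_append.mp hg with hg | hg
        · exact huni g (hdlsub g hg)
        · rw [List.mem_singleton] at hg
          subst hg
          refine ⟨by simp, fun q hq => ?_⟩
          rw [hchrapp]
          rcases List.mem_append.mp hq with hq | hq
          · exact (huni _ hlast).2 q hq
          · rw [List.mem_singleton] at hq
            subst hq
            exact ⟨hp2, hchr.symm⟩
      have hpw₁ : (gs.dropLast ++ [gs.getLastD [] ++ [p]]).Pairwise
          (fun a b => chr a < chr b) := by
        rw [List.pairwise_append]
        refine ⟨hpwdec.1, List.pairwise_singleton _ _, ?_⟩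
        intro a ha b hb
        rw [List.mem_singleton] at hb
        subst hb
        rw [hchrapp]
        exact hpwdec.2 a ha
      have hle₁ : ∀ p' ∈ ps', ∀ g ∈ gs.dropLast ++ [gs.getLastD [] ++ [p]],
          chr g ≤ hd0 p'.2 := by
        intro p' hp' g hg
        rcases List.mem_append.mp hg with hg | hg
        · exact hle p' (by simp [hp']) g (hdlsub g hg)
        · rw [List.mem_singleton] at hg
          subst hg
          rw [hchrapp]
          exact hle p' (by simp [hp']) _ hlast
      obtain ⟨hg₁, hf₁⟩ := ih _ huni₁ hpw₁ (fun q hq => hne q (by simp [hq])) hppw.2 hle₁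
      refine ⟨hg₁, ?_⟩
      rw [hf₁]
      have : (gs.dropLast ++ [gs.getLastD [] ++ [p]]).flatten = gs.flatten ++ [p] := by
        conv_rhs => rw [← hdec]
        simp
      rw [this]
      simp
    · -- new first character (or first word): open a new group
      have hlt : ∀ g ∈ gs, chr g < hd0 p.2 := by
        intro g hg
        have hgs : gs ≠ [] := List.ne_nil_of_mem hg
        have hble : chr g ≤ hd0 p.2 := hle p (by simp) g hg
        have hlast : gs.getLastD [] ∈ gs := getLastD_mem gs [] hgs
        have hlastne : gs.getLastD [] ≠ [] := (huni _ hlast).1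
        have hlh := (huni _ hlast).2 _ (headD_mem _ (0, "") hlastne)
        have hnbeq : chr (gs.getLastD []) ≠ hd0 p.2 := by
          intro heq
          refine hcond ⟨hgs, ?_⟩
          rw [fc_eq _ hlh.1, fc_eq _ hp2, hlh.2, heq]
          exact beq_self_eq_true _
        have hlastle : chr (gs.getLastD []) ≤ hd0 p.2 := hle p (by simp) _ hlast
        have hdec : gs.dropLast ++ [gs.getLastD []] = gs := by
          rw [List.getLastD_eq_getLast?, List.getLast?_eq_some_getLast hgs]
          exact List.dropLast_concat_getLast hgs
        refine lt_of_le_of_ne hble ?_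
        intro heq
        have hg' : g ∈ gs.dropLast ++ [gs.getLastD []] := by rw [hdec]; exact hg
        rcases List.mem_append.mp hg' with hgd | hgd
        · have hpwdec : ∀ a ∈ gs.dropLast, chr a < chr (gs.getLastD []) := by
            have hpw2 := hpw
            conv at hpw2 => rw [← hdec]
            rw [List.pairwise_append] at hpw2
            exact fun a ha => by simpa using hpw2.2.2 a ha _ (by simp)
          have hlg : chr (gs.getLastD []) ≤ chr g := by rw [heq]; exact hlastle
          exact absurd (lt_of_lt_of_le (hpwdec g hgd) hlg) (lt_irrefl _)
        · rw [List.mem_singleton] at hgd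
          subst hgd
          exact hnbeq heq
      rw [pairStep, if_neg hcond]
      have huni₁ : ∀ g ∈ gs ++ [[p]], g ≠ [] ∧ ∀ q ∈ g, q.2 ≠ "" ∧ hd0 q.2 = chr g := by
        intro g hg
        rcases List.mem_append.mp hg with hg | hg
        · exact huni g hg
        · rw [List.mem_singleton] at hg
          subst hg
          refine ⟨by simp, fun q hq => ?_⟩
          rw [List.mem_singleton] at hq
          subst hq
          exact ⟨hp2, (chr_single q).symm⟩
      have hpw₁ : (gs ++ [[p]]).Pairwise (fun a b => chr a < chr b) := by
        rw [List.pairwise_append]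
        refine ⟨hpw, List.pairwise_singleton _ _, ?_⟩
        intro a ha b hb
        rw [List.mem_singleton] at hb
        subst hb
        rw [chr_single]
        exact hlt a ha
      have hle₁ : ∀ p' ∈ ps', ∀ g ∈ gs ++ [[p]], chr g ≤ hd0 p'.2 := by
        intro p' hp' g hg
        rcases List.mem_append.mp hg with hg | hg
        · exact hle p' (by simp [hp']) g hg
        · rw [List.mem_singleton] at hg
          subst hg
          rw [chr_single]
          exact hd0_mono hp2 (hne p' (by simp [hp'])) (hppw.1 p' hp')
      obtain ⟨hg₁, hf₁⟩ := ih _ huni₁ hpw₁ (fun q hq => hne q (by simp [hq])) hppw.2 hle₁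
      refine ⟨hg₁, ?_⟩
      rw [hf₁]
      simp

-- L7: the while-loop on remaining groups pgs equals round-by-round emission
theorem loop_eq_rounds (sq : List String) :
    ∀ (fuel : Nat) (used : List Int) (res : List String)
      (pgs : List (List (Int × String))),
      PGood pgs →
      (PySem.List.enumerate sq 0).filter (fun p => p.1 ∉ used) = pgs.flatten →
      pgs.flatten.length < fuel →
      sortecleLoop sq fuel res used = res ++ altRounds (pgs.map (List.map Prod.snd)) := by
  intro fuel
  induction fuel with
  | zero =>
    intro used res pgs _ _ hlen
    exact absurd hlen (Nat.not_lt_zero _)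
  | succ f ih =>
    intro used res pgs hgood hfil hlen
    have hndE : ((PySem.List.enumerate sq 0).map (·.1)).Nodup := by
      have hplt := PySem.List.pairwise_lt_enumerate (xs := sq) (s := 0)
      have : ((PySem.List.enumerate sq 0).map (·.1)).Pairwise (· < ·) :=
        List.pairwise_map.mpr hplt
      exact this.imp (fun h => ne_of_lt h)
    have hndF : (pgs.flatten.map (·.1)).Nodup := by
      rw [← hfil]
      exact List.Nodup.sublist (List.Sublist.map _ List.filter_sublist) hndE
    have hgne : ∀ g ∈ pgs, g ≠ [] := fun g hg => (hgood.1 g hg).1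
    rw [sortecleLoop]
    rw [foldl_step_eq_purePass _ none res used hndE, hfil,
      purePass_flatten pgs none hgood (fun g _ => by simp)]
    cases hpgs : pgs with
    | nil =>
      subst hpgs
      simp only [lastCP, List.foldl_nil, List.map_nil, List.append_nil, Option.isSome_none,
        Bool.false_eq_true, if_false]
      rw [altRounds]
      simp
    | cons g rest =>
      rw [← hpgs]
      have hpgsne : pgs ≠ [] := by rw [hpgs]; exact List.cons_ne_nil _ _
      have hsome : (lastCP none pgs).isSome = true :=
        lastCP_isSome none pgs (fun h => absurd h hpgsne)
      simp only [hsome, if_true]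
      -- the new unused pairs are exactly the flattened tails
      set I := pgs.map (fun g => (g.headD (0, "")).1) with hI
      have hfil' : (PySem.List.enumerate sq 0).filter
            (fun p => p.1 ∉ used ++ I)
          = ((pgs.map (fun g => g.drop 1)).filter (· ≠ [])).flatten := by
        have hsplit : (PySem.List.enumerate sq 0).filter (fun p => p.1 ∉ used ++ I)
            = ((PySem.List.enumerate sq 0).filter (fun p => p.1 ∉ used)).filter
                (fun p => p.1 ∉ I) := by
          rw [List.filter_filter]
          apply List.filter_congr
          intro q _
          simp [List.mem_append, Bool.and_comm]
        rw [hsplit, hfil,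
          filter_flatten_tails pgs I hgne (fun g hg => List.mem_map_of_mem hg)
            (head_idx_not_in_tails pgs hgne hndF),
          List.flatten_filter_ne_nil]
      have hlen' : (((pgs.map (fun g => g.drop 1)).filter (· ≠ [])).flatten).length < f := by
        have heq : ((pgs.map (fun g => g.drop 1)).filter (· ≠ [])).flatten
            = (pgs.map (fun g => g.drop 1)).flatten := List.flatten_filter_ne_nil
        have hl2 := congrArg List.length heq
        have := flatten_drop_lt pgs hpgsne hgne
        omega
      rw [ih (used ++ I) (res ++ pgs.map (fun g => (g.headD (0, "")).2))
        ((pgs.map (fun g => g.drop 1)).filter (· ≠ [])) (PGood_next pgs hgood) hfil' hlen']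
      -- unfold one round of altRounds on the string side
      have hmapne : pgs.map (List.map Prod.snd) ≠ [] := by
        simpa using hpgsne
      conv_rhs => rw [altRounds]
      rw [dif_neg hmapne]
      have hheads : (pgs.map (List.map Prod.snd)).map (fun g => g.headD "")
          = pgs.map (fun g => (g.headD (0, "")).2) := by
        rw [List.map_map]
        exact List.map_congr_left (fun g _ => headD_snd g)
      have hnext : ((pgs.map (List.map Prod.snd)).filter (fun g => 1 < g.length)).map
            (fun g => g.drop 1)
          = ((pgs.map (fun g => g.drop 1)).filter (· ≠ [])).map (List.map Prod.snd) := by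
        rw [List.filter_map, List.filter_map, List.map_map, List.map_map]
        have hpred : ∀ g ∈ pgs,
            ((fun (g : List String) => decide (1 < g.length)) ∘ List.map Prod.snd) g
              = ((fun (g : List (Int × String)) => decide (g ≠ [])) ∘ (fun g => g.drop 1)) g := by
          intro g _
          cases g with
          | nil => simp
          | cons a t => cases t <;> simp
        rw [List.filter_congr hpred]
        apply List.map_congr_left
        intro g _
        simp [Function.comp]
      rw [hheads, hnext, List.append_assoc]

-- ===== VERDICT (by name: the statement is the Claim_ definition above) =====
theorem sortecle_spec : Claim_equal_sortecle := by
  unfold Claim_equal_sortecle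
  intro seq _ hpre
  unfold Spec_sortecle sortecle sortecle_alt
  set sq := PySem.List.sorted seq (fun x => x) false with hsq
  have hnem : ∀ p ∈ PySem.List.enumerate sq 0, p.2 ≠ "" := by
    intro p hp
    have h1 : p.2 ∈ sq := by
      have h2 := List.mem_map_of_mem (f := (·.2)) hp
      rwa [PySem.List.map_snd_enumerate] at h2
    have hmem : p.2 ∈ seq := (PySem.List.mem_sorted _ _ _ _).mp h1
    intro he; rw [he] at hmem; exact hpre hmem
  have hppw : (PySem.List.enumerate sq 0).Pairwise (fun p q => p.2 ≤ q.2) :=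
    pairwise_enumerate_snd sq 0 (PySem.List.sorted_pairwise seq (fun x => x))
  obtain ⟨hgood, hflat⟩ := foldl_pairStep_good (PySem.List.enumerate sq 0) []
    (by simp) (by simp) hnem hppw (by simp)
  simp only [List.flatten_nil, List.nil_append] at hflat
  have hmain := loop_eq_rounds sq (sq.length + 1) [] []
    ((PySem.List.enumerate sq 0).foldl pairStep []) hgood
    (by rw [hflat]; exact List.filter_eq_self.mpr (by simp))
    (by rw [hflat, PySem.List.length_enumerate]; omega)
  rw [hmain, foldl_pairStep_map, PySem.List.map_snd_enumerate]
  simp
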